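-- pv_equiv track=rewrite | github.com/Leet-Lyn/Python | TextEditingByLine.py | delete_string_from_lines
-- ===== SOURCE A (Python) =====
-- def delete_string_from_lines(lines, string_to_delete, times_per_line):
--     new_lines = []
--     for line in lines:
--         if times_per_line >= 0:
--             new_line = line
--             count = 0
--             start = 0
--             while count < times_per_line:
--                 idx = new_line.find(string_to_delete, start)
--                 if idx == -1:
--                     break
--                 new_line = new_line[:idx] + new_line[idx + len(string_to_delete):]
--                 count += 1
--                 start = idx
--             new_lines.append(new_line)
--         else:
--             rev_line = line[::-1]
--             rev_string = string_to_delete[::-1]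
--             rev_times = -times_per_line
--             new_rev_line = rev_line
--             count = 0
--             start = 0
--             while count < rev_times:
--                 idx = new_rev_line.find(rev_string, start)
--                 if idx == -1:
--                     break
--                 new_rev_line = new_rev_line[:idx] + new_rev_line[idx + len(rev_string):]
--                 count += 1
--                 start = idx
--             new_lines.append(new_rev_line[::-1])
--     return new_lines
-- ===== SOURCE B (Python) =====
-- def _delete_up_to(line, sub, k):
--     # One forward pass over the original line: collect the kept pieces, no re-slicing.
--     parts = []
--     pos = 0
--     count = 0
--     m = len(sub)
--     while count < k:
--         idx = line.find(sub, pos)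
--         if idx == -1:
--             break
--         parts.append(line[pos:idx])
--         pos = idx + m
--         count += 1
--     parts.append(line[pos:])
--     return "".join(parts)
--
-- def delete_string_from_lines(lines, string_to_delete, times_per_line):
--     if times_per_line >= 0:
--         return [_delete_up_to(line, string_to_delete, times_per_line) for line in lines]
--     rev_sub = string_to_delete[::-1]
--     return [_delete_up_to(line[::-1], rev_sub, -times_per_line)[::-1] for line in lines]
-- ===== Notes on version B (the rewrite author's own statement) =====
-- stated objective: alternative
-- what changed: B replaces A's repeated find-and-reslice of the working string (each deletion rebuilds the whole line and restarts find in the modified string) by a single forward scan of the original line that collects the kept pieces and joins them once; it trades A's in-place string rebuilding for a parts list.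
import Mathlib
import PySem

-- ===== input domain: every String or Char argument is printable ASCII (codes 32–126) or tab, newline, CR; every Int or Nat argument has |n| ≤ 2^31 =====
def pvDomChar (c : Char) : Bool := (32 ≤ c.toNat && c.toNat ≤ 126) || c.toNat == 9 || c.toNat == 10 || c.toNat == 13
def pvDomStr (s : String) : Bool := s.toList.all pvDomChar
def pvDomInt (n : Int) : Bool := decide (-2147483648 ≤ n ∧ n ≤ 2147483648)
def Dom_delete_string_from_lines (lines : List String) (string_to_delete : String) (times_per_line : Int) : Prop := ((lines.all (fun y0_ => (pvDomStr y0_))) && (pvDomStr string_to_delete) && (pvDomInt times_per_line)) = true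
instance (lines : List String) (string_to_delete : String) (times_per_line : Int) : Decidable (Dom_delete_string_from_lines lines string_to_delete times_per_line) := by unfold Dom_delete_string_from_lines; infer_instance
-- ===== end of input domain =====

-- B does one forward pass per line collecting kept pieces instead of A's repeated
-- find-and-reslice of the whole working string; return values proved equal on all inputs.

-- ===== PORT A =====
-- A's inner while-loop (identical in both branches of A): state = (working line, start);
-- it runs at most `times` iterations (count goes 0,1,… so fuel = times.toNat).
def pvLoopA (pat : List Char) : Nat → List Char → Int → List Char
  | 0, nl, _ => nl
  | fuel + 1, nl, start =>
      let idx := PySem.Chars.findFrom nl pat start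
      if idx = -1 then nl
      else
        pvLoopA pat fuel
          (PySem.List.slice nl none (some idx) ++
            PySem.List.slice nl (some (idx + pat.length)) none)
          idx

def delete_string_from_lines (lines : List String) (string_to_delete : String) (times_per_line : Int) : List String :=
  lines.map (fun line =>
    if times_per_line ≥ 0 then
      String.ofList (pvLoopA string_to_delete.toList times_per_line.toNat line.toList 0)
    else
      -- line[::-1] / string_to_delete[::-1] are List.reverse (PySem.List.slice?_none_none_neg_one)
      String.ofList (pvLoopA string_to_delete.toList.reverse (-times_per_line).toNat line.toList.reverse 0).reverse)

-- ===== PORT B =====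
-- Source B's while-loop: scan the ORIGINAL line with a moving position, collecting kept slices.
def pvLoopB (line pat : List Char) : Nat → Nat → List (List Char) → List (List Char)
  | 0, pos, parts => parts ++ [PySem.List.slice line (some (pos : Int)) none]
  | fuel + 1, pos, parts =>
      let idx := PySem.Chars.findFrom line pat (pos : Int)
      if idx = -1 then parts ++ [PySem.List.slice line (some (pos : Int)) none]
      else
        pvLoopB line pat fuel (idx.toNat + pat.length)
          (parts ++ [PySem.List.slice line (some (pos : Int)) (some idx)])

-- _delete_up_to: run the scan, then "".join(parts)
def pvDelUpTo (line pat : List Char) (k : Int) : List Char :=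
  PySem.Chars.join [] (pvLoopB line pat k.toNat 0 [])

def delete_string_from_lines_alt (lines : List String) (string_to_delete : String) (times_per_line : Int) : List String :=
  if times_per_line ≥ 0 then
    lines.map (fun line => String.ofList (pvDelUpTo line.toList string_to_delete.toList times_per_line))
  else
    let revSub := string_to_delete.toList.reverse
    lines.map (fun line => String.ofList (pvDelUpTo line.toList.reverse revSub (-times_per_line)).reverse)

-- ===== PRECONDITION & SPEC =====
def Spec_delete_string_from_lines (lines : List String) (string_to_delete : String) (times_per_line : Int) (out : List String) : Prop := out = delete_string_from_lines_alt lines string_to_delete times_per_line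
instance (lines : List String) (string_to_delete : String) (times_per_line : Int) (out : List String) : Decidable (Spec_delete_string_from_lines lines string_to_delete times_per_line out) := by unfold Spec_delete_string_from_lines; infer_instance

-- ===== CLAIM (what is proved, stated in full; the proofs are below) =====
def Claim_equal_delete_string_from_lines : Prop := ∀ (lines : List String) (string_to_delete : String) (times_per_line : Int), Dom_delete_string_from_lines lines string_to_delete times_per_line → Spec_delete_string_from_lines lines string_to_delete times_per_line (delete_string_from_lines lines string_to_delete times_per_line)

-- ===== LEMMAS AND PROOFS =====

-- Reference form of one line's result: repeatedly cut the first occurrence out of the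
-- untouched suffix (both loops compute exactly this).
def pvRef (pat : List Char) : Nat → List Char → List Char
  | 0, rest => rest
  | fuel + 1, rest =>
      let j := PySem.Chars.find rest pat
      if j = -1 then rest
      else rest.take j.toNat ++ pvRef pat fuel (rest.drop (j.toNat + pat.length))

theorem pvJoin_nil_eq_flatten (parts : List (List Char)) :
    PySem.Chars.join [] parts = parts.flatten := by
  induction parts with
  | nil => rfl
  | cons p ps ih =>
    cases ps with
    | nil => simp [PySem.Chars.join, List.intercalate]
    | cons q qs =>
      rw [PySem.Chars.join_cons_cons] at *
      simp_all

theorem pvLoopA_eq_ref (pat : List Char) (fuel : Nat) :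
    ∀ (buf rest : List Char), pvLoopA pat fuel (buf ++ rest) (buf.length : Int) = buf ++ pvRef pat fuel rest := by
  induction fuel with
  | zero => intro buf rest; rfl
  | succ f ih =>
    intro buf rest
    rw [pvLoopA, pvRef]
    rw [PySem.Chars.findFrom_natCast (buf ++ rest) pat buf.length (by simp)]
    rw [List.drop_left]
    set j := PySem.Chars.find rest pat with hj
    by_cases h : j = -1
    · simp [h]
    · have hj0 : 0 ≤ j := by
        have := PySem.Chars.neg_one_le_find rest pat
        omega
      have hjlen : j ≤ (rest.length : Int) := PySem.Chars.find_le_length rest pat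
      have hidx : ¬ ((buf.length : Int) + j = -1) := by omega
      simp only [h, if_false, hidx, if_false]
      have hcast : (buf.length : Int) + j = ((buf.length + j.toNat : Nat) : Int) := by omega
      rw [hcast, PySem.List.slice_to_natCast]
      have hcast2 : ((buf.length + j.toNat : Nat) : Int) + (pat.length : Int)
          = ((buf.length + j.toNat + pat.length : Nat) : Int) := by push_cast; ring
      rw [hcast2, PySem.List.slice_from_natCast]
      have htake : (buf ++ rest).take (buf.length + j.toNat) = buf ++ rest.take j.toNat := by
        rw [List.take_append]; simp
      have hdrop : (buf ++ rest).drop (buf.length + j.toNat + pat.length)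
          = rest.drop (j.toNat + pat.length) := by
        rw [List.drop_append, List.drop_eq_nil_of_le (by omega), List.nil_append]
        congr 1
        omega
      rw [htake, hdrop]
      have hlen : (buf ++ rest.take j.toNat).length = buf.length + j.toNat := by
        simp
        omega
      have := ih (buf ++ rest.take j.toNat) (rest.drop (j.toNat + pat.length))
      rw [hlen] at this
      rw [this, List.append_assoc]

theorem pvLoopB_eq_ref (line pat : List Char) (fuel : Nat) :
    ∀ (pos : Nat) (parts : List (List Char)), pos ≤ line.length →
      (pvLoopB line pat fuel pos parts).flatten = parts.flatten ++ pvRef pat fuel (line.drop pos) := by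
  induction fuel with
  | zero =>
    intro pos parts _
    rw [pvLoopB, pvRef, List.flatten_append, PySem.List.slice_from_natCast]
    simp
  | succ f ih =>
    intro pos parts hpos
    rw [pvLoopB, pvRef]
    rw [PySem.Chars.findFrom_natCast line pat pos hpos]
    set j := PySem.Chars.find (line.drop pos) pat with hj
    by_cases h : j = -1
    · simp [h, PySem.List.slice_from_natCast]
    · have hj0 : 0 ≤ j := by
        have := PySem.Chars.neg_one_le_find (line.drop pos) pat
        omega
      have hidx : ¬ ((pos : Int) + j = -1) := by omega
      simp only [h, if_false, hidx, if_false]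
      have hpre := (PySem.Chars.find_spec (s := line.drop pos) (sub := pat) (by rw [← hj]; exact hj0)).1
      rw [← hj] at hpre
      have hjlen : j ≤ (((line.drop pos).length : Nat) : Int) := by
        rw [hj]; exact PySem.Chars.find_le_length (line.drop pos) pat
      have h1 : pat.length ≤ ((line.drop pos).drop j.toNat).length := hpre.length_le
      simp only [List.length_drop] at h1 hjlen
      have hjle : j.toNat + pat.length ≤ line.length - pos := by omega
      have hcast : (pos : Int) + j = ((pos + j.toNat : Nat) : Int) := by omega
      rw [hcast, PySem.List.slice_natCast]
      have htoNat : (((pos + j.toNat : Nat) : Int)).toNat = pos + j.toNat := by omega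
      rw [htoNat]
      rw [ih (pos + j.toNat + pat.length) _ (by omega)]
      rw [List.flatten_append]
      have hd : line.drop (pos + j.toNat + pat.length) = (line.drop pos).drop (j.toNat + pat.length) := by
        rw [List.drop_drop]; ring_nf
      have ht : (line.drop pos).take (pos + j.toNat - pos) = (line.drop pos).take j.toNat := by
        congr 1; omega
      rw [hd, ht]
      simp [List.append_assoc]

theorem pvDelUpTo_eq_ref (line pat : List Char) (k : Int) :
    pvDelUpTo line pat k = pvRef pat k.toNat line := by
  rw [pvDelUpTo, pvJoin_nil_eq_flatten, pvLoopB_eq_ref line pat k.toNat 0 [] (by omega)]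
  simp

theorem pvLoopA_zero_eq_ref (pat : List Char) (fuel : Nat) (line : List Char) :
    pvLoopA pat fuel line 0 = pvRef pat fuel line := by
  have := pvLoopA_eq_ref pat fuel [] line
  simpa using this

-- ===== VERDICT (by name: the statement is the Claim_ definition above) =====
theorem delete_string_from_lines_spec : Claim_equal_delete_string_from_lines := by
  intro lines s k _
  unfold Spec_delete_string_from_lines delete_string_from_lines delete_string_from_lines_alt
  by_cases hk : k ≥ 0
  · simp only [if_pos hk]
    apply List.map_congr_left
    intro line _
    rw [pvDelUpTo_eq_ref, pvLoopA_zero_eq_ref]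
  · simp only [if_neg hk]
    apply List.map_congr_left
    intro line _
    rw [pvDelUpTo_eq_ref, pvLoopA_zero_eq_ref]
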